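-- pv_equiv track=rewrite | github.com/paras-a/Data-Structures-and-Algorithms | Arrays/arrays.py | group_by_sum
-- ===== SOURCE A (Python) =====
-- def group_by_sum(arr, target_sum):
--     """
--     Group array elements into subarrays where each subarray sums to target_sum.
--
--     @param arr: List[int] -- Array of integers
--     @param target_sum: int -- Target sum for each subarray
--     @return: List[List[int]] -- List of subarrays summing to target_sum, or empty list if not possible
--     @example:
--         >>> group_by_sum([1, 2, 3, 4, 5], 5)
--         [[1, 4], [2, 3], [5]]
--         >>> group_by_sum([1, 2, 3], 10)
--         []
--         >>> group_by_sum([], 5)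
--         []
--     """
--     sum_list = []
--     for i in range(len(arr)):
--         current_element = arr[i]
--         for j in range(len(arr)):
--             if j != i:
--                 next_element = arr[j]
--                 if current_element + next_element == target_sum:
--                     if (not [current_element, next_element] in sum_list and
--                             not [next_element, current_element] in sum_list):
--                         sum_list.append([current_element, next_element])
--         if current_element == target_sum:
--             sum_list.append([target_sum])
--     return sum_list
-- ===== SOURCE B (Python) =====
-- def group_by_sum(arr, target_sum):
--     # One pass with a precomputed count table and a set of emitted unordered pairs.
--     counts = {}
--     for x in arr:
--         counts[x] = counts.get(x, 0) + 1
--     seen = set()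
--     out = []
--     for x in arr:
--         y = target_sum - x
--         if y in counts and (y != x or counts[x] >= 2):
--             key = (x, y) if x <= y else (y, x)
--             if key not in seen:
--                 seen.add(key)
--                 out.append([x, y])
--         if x == target_sum:
--             out.append([target_sum])
--     return out
-- ===== Notes on version B (the rewrite author's own statement) =====
-- stated objective: faster
-- what changed: Replaced the O(n^2) double index scan with per-pair list-membership dedup by a single pass over the array using a precomputed value-count table and a set of already-emitted unordered pairs.
import Mathlib
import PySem

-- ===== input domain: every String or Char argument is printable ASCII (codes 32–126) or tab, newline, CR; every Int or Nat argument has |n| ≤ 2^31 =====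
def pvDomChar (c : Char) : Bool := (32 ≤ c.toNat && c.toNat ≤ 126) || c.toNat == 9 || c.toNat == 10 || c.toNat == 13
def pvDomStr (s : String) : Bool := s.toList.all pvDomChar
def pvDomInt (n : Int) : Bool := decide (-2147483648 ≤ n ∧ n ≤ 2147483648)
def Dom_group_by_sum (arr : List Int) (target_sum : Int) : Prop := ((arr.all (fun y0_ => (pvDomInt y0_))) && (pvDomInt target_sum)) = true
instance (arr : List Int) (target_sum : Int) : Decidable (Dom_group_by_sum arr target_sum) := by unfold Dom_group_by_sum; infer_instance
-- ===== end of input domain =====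

-- B replaces A's quadratic double index scan (with list-membership dedup) by one pass
-- over the array using a precomputed count table and a set of emitted unordered pairs.

-- ===== PORT A =====
def group_by_sum (arr : List Int) (target_sum : Int) : List (List Int) :=
  (PySem.List.pyRange 0 arr.length 1).foldl (fun sum_list i =>
    let current_element := PySem.List.pyGetD arr i 0
    let sum_list :=
      (PySem.List.pyRange 0 arr.length 1).foldl (fun sl j =>
        if j ≠ i then
          let next_element := PySem.List.pyGetD arr j 0
          if current_element + next_element = target_sum then
            if ¬ ([current_element, next_element] ∈ sl) ∧ ¬ ([next_element, current_element] ∈ sl) then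
              sl ++ [[current_element, next_element]]
            else sl
          else sl
        else sl) sum_list
    if current_element = target_sum then sum_list ++ [[target_sum]] else sum_list) []

-- ===== PORT B =====
def group_by_sum_alt (arr : List Int) (target_sum : Int) : List (List Int) :=
  let counts : PySem.Dict Int Int :=
    arr.foldl (fun d x => d.insert x (d.getD x 0 + 1)) PySem.Dict.empty
  let res :=
    arr.foldl (fun (st : PySem.Set (Int × Int) × List (List Int)) x =>
      let seen := st.1
      let out := st.2
      let y := target_sum - x
      let st1 :=
        if counts.contains y = true ∧ (y ≠ x ∨ 2 ≤ counts.getD x 0) then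
          let key := if x ≤ y then (x, y) else (y, x)
          if ¬ (PySem.Set.contains seen key = true) then
            (PySem.Set.add seen key, out ++ [[x, y]])
          else (seen, out)
        else (seen, out)
      if x = target_sum then (st1.1, st1.2 ++ [[target_sum]]) else st1)
      (PySem.Set.empty, [])
  res.2

-- ===== PRECONDITION & SPEC =====
def Spec_group_by_sum (arr : List Int) (target_sum : Int) (out : List (List Int)) : Prop := out = group_by_sum_alt arr target_sum
instance (arr : List Int) (target_sum : Int) (out : List (List Int)) : Decidable (Spec_group_by_sum arr target_sum out) := by unfold Spec_group_by_sum; infer_instance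

-- ===== CLAIM (what is proved, stated in full; the proofs are below) =====
def Claim_equal_group_by_sum : Prop := ∀ (arr : List Int) (target_sum : Int), Dom_group_by_sum arr target_sum → Spec_group_by_sum arr target_sum (group_by_sum arr target_sum)

-- ===== LEMMAS AND PROOFS =====

-- value-level condition: some index other than the current one holds target_sum - x
def pvCval (arr : List Int) (t x : Int) : Bool :=
  decide ((t - x) ∈ arr) && (decide ((t - x) ≠ x) || decide (2 ≤ arr.count x))

-- value-level step shared shape of both loops
def pvStepV (arr : List Int) (t : Int) (L : List (List Int)) (x : Int) : List (List Int) :=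
  let L1 := if pvCval arr t x = true ∧ ¬ ([x, t - x] ∈ L) ∧ ¬ ([t - x, x] ∈ L)
            then L ++ [[x, t - x]] else L
  if x = t then L1 ++ [[t]] else L1

theorem pv_inner_eq (arr : List Int) (t i x : Int) (js : List Int) (L : List (List Int)) :
    js.foldl (fun sl j =>
      if j ≠ i then
        let nxt := PySem.List.pyGetD arr j 0
        if x + nxt = t then
          if ¬ ([x, nxt] ∈ sl) ∧ ¬ ([nxt, x] ∈ sl) then sl ++ [[x, nxt]] else sl
        else sl
      else sl) L
    = if (∃ j ∈ js, j ≠ i ∧ x + PySem.List.pyGetD arr j 0 = t)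
          ∧ ¬ ([x, t - x] ∈ L) ∧ ¬ ([t - x, x] ∈ L)
      then L ++ [[x, t - x]] else L := by
  induction js generalizing L with
  | nil => simp
  | cons j js ih =>
    simp only [List.foldl_cons, List.mem_cons, exists_eq_or_imp]
    by_cases hji : j = i
    · subst hji
      simp only [ne_eq, not_true, if_false, ih, false_and, false_or]
    · rw [if_pos hji]
      by_cases heq : x + PySem.List.pyGetD arr j 0 = t
      · have hnx : t - x = PySem.List.pyGetD arr j 0 := by omega
        rw [if_pos heq]
        by_cases hm : ¬ ([x, PySem.List.pyGetD arr j 0] ∈ L) ∧ ¬ ([PySem.List.pyGetD arr j 0, x] ∈ L)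
        · rw [if_pos hm, ih]
          have h1 : ¬ ((∃ j ∈ js, j ≠ i ∧ x + PySem.List.pyGetD arr j 0 = t) ∧
              [x, t - x] ∉ L ++ [[x, PySem.List.pyGetD arr j 0]] ∧
              [t - x, x] ∉ L ++ [[x, PySem.List.pyGetD arr j 0]]) := by
            rw [hnx]; intro hc; exact hc.2.1 (by simp)
          have h2 : ((j ≠ i ∧ x + PySem.List.pyGetD arr j 0 = t) ∨
              ∃ j ∈ js, j ≠ i ∧ x + PySem.List.pyGetD arr j 0 = t) ∧
              [x, t - x] ∉ L ∧ [t - x, x] ∉ L := by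
            rw [hnx]; exact ⟨Or.inl ⟨hji, heq⟩, hm⟩
          rw [if_neg h1, if_pos h2, hnx]
        · rw [if_neg hm, ih]
          have h1 : ¬ ((∃ j ∈ js, j ≠ i ∧ x + PySem.List.pyGetD arr j 0 = t) ∧
              [x, t - x] ∉ L ∧ [t - x, x] ∉ L) := by
            rw [hnx]; intro hc; exact hm hc.2
          have h2 : ¬ (((j ≠ i ∧ x + PySem.List.pyGetD arr j 0 = t) ∨
              ∃ j ∈ js, j ≠ i ∧ x + PySem.List.pyGetD arr j 0 = t) ∧
              [x, t - x] ∉ L ∧ [t - x, x] ∉ L) := by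
            rw [hnx]; intro hc; exact hm hc.2
          rw [if_neg h1, if_neg h2]
      · rw [if_neg heq, ih]
        have hcond : ((j ≠ i ∧ x + PySem.List.pyGetD arr j 0 = t) ∨
            ∃ j ∈ js, j ≠ i ∧ x + PySem.List.pyGetD arr j 0 = t) ↔
            (∃ j ∈ js, j ≠ i ∧ x + PySem.List.pyGetD arr j 0 = t) := by
          simp [heq]
        rw [if_congr (and_congr_left' hcond) rfl rfl]

theorem pv_exists_other (arr : List Int) (t x : Int) (i : Int)
    (h0 : 0 ≤ i) (hi : i < (arr.length : Int)) (hx : PySem.List.pyGetD arr i 0 = x) :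
    (∃ j ∈ PySem.List.pyRange 0 arr.length 1, j ≠ i ∧ x + PySem.List.pyGetD arr j 0 = t)
      ↔ pvCval arr t x = true := by
  have hil : i.toNat < arr.length := by omega
  have hxi : arr[i.toNat] = x := by
    rw [← hx, PySem.List.pyGetD_eq_getElem (i := i) arr 0 h0 hi]
  unfold pvCval
  simp only [Bool.and_eq_true, Bool.or_eq_true, decide_eq_true_eq]
  constructor
  · rintro ⟨j, hjmem, hji, hsum⟩
    have hj := (PySem.List.mem_pyRange_one).mp hjmem
    have hjl : j.toNat < arr.length := by omega
    have hjget : arr[j.toNat] = t - x := by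
      have h := PySem.List.pyGetD_eq_getElem (i := j) arr 0 (by omega) (by omega)
      rw [h] at hsum; omega
    refine ⟨by rw [← hjget]; exact List.getElem_mem hjl, ?_⟩
    by_cases hyx : t - x = x
    · right
      have hne : i.toNat ≠ j.toNat := by omega
      have hdup : arr.Duplicate x := by
        rw [List.duplicate_iff_exists_distinct_get]
        rcases Nat.lt_or_ge i.toNat j.toNat with hlt | hge
        · exact ⟨⟨i.toNat, hil⟩, ⟨j.toNat, hjl⟩, hlt, by simp [hxi], by simp [hjget, hyx]⟩
        · have hlt : j.toNat < i.toNat := by omega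
          exact ⟨⟨j.toNat, hjl⟩, ⟨i.toNat, hil⟩, hlt, by simp [hjget, hyx], by simp [hxi]⟩
      exact List.duplicate_iff_two_le_count.mp hdup
    · left; exact hyx
  · rintro ⟨hmem, hcase⟩
    by_cases hyx : t - x = x
    · have hcnt : 2 ≤ List.count x arr := by
        rcases hcase with h | h
        · exact absurd hyx h
        · exact h
      have hdup := List.duplicate_iff_two_le_count.mpr hcnt
      rw [List.duplicate_iff_exists_distinct_get] at hdup
      obtain ⟨n, m, hnm, hxn, hxm⟩ := hdup
      by_cases hni : (n : Nat) = i.toNat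
      · refine ⟨(m : Nat), PySem.List.mem_pyRange_one.mpr ⟨by omega, by omega⟩, by omega, ?_⟩
        rw [PySem.List.pyGetD_eq_getElem (i := ((m : Nat) : Int)) arr 0 (by omega) (by omega)]
        simp only [Int.toNat_natCast]
        have : arr[(m : Nat)] = x := by simpa using hxm.symm
        omega
      · refine ⟨(n : Nat), PySem.List.mem_pyRange_one.mpr ⟨by omega, by omega⟩, by omega, ?_⟩
        rw [PySem.List.pyGetD_eq_getElem (i := ((n : Nat) : Int)) arr 0 (by omega) (by omega)]
        simp only [Int.toNat_natCast]
        have : arr[(n : Nat)] = x := by simpa using hxn.symm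
        omega
    · obtain ⟨k, hk, hkget⟩ := List.mem_iff_getElem.mp hmem
      refine ⟨(k : Int), PySem.List.mem_pyRange_one.mpr ⟨by omega, by omega⟩, ?_, ?_⟩
      · intro hki
        have hks : k = i.toNat := by omega
        subst hks
        rw [hxi] at hkget
        exact hyx hkget.symm
      · rw [PySem.List.pyGetD_eq_getElem (i := (k : Int)) arr 0 (by omega) (by omega)]
        simp only [Int.toNat_natCast]
        omega

theorem pv_A_eq_foldV (arr : List Int) (t : Int) :
    group_by_sum arr t = arr.foldl (pvStepV arr t) [] := by
  unfold group_by_sum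
  rw [PySem.List.foldl_congr_mem _ _
      (fun L i => pvStepV arr t L (PySem.List.pyGetD arr i 0)) []
      (by
        intro L i hi
        have hmem := PySem.List.mem_pyRange_one.mp hi
        simp only [pv_inner_eq, pvStepV]
        have hcond := pv_exists_other arr t (PySem.List.pyGetD arr i 0) i (by omega) (by omega) rfl
        rw [if_congr (and_congr_left' hcond) rfl rfl])]
  exact PySem.List.foldl_pyRange_zero_pyGetD arr 0 (pvStepV arr t) []

def pvInv (seen : PySem.Set (Int × Int)) (L : List (List Int)) : Prop :=
  ∀ p : Int × Int, p ∈ seen ↔ (p.1 ≤ p.2 ∧ ([p.1, p.2] ∈ L ∨ [p.2, p.1] ∈ L))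

-- B's loop body, with the count table already rewritten to Dict.counter
def pvStepB (arr : List Int) (t : Int) (st : PySem.Set (Int × Int) × List (List Int)) (x : Int) :
    PySem.Set (Int × Int) × List (List Int) :=
  let seen := st.1
  let out := st.2
  let y := t - x
  let st1 :=
    if (PySem.Dict.counter arr).contains y = true ∧
        (y ≠ x ∨ 2 ≤ (PySem.Dict.counter arr).getD x 0) then
      let key := if x ≤ y then (x, y) else (y, x)
      if ¬ (PySem.Set.contains seen key = true) then (PySem.Set.add seen key, out ++ [[x, y]])
      else (seen, out)
    else (seen, out)
  if x = t then (st1.1, st1.2 ++ [[t]]) else st1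

theorem pvInv_singleton (seen : PySem.Set (Int × Int)) (L : List (List Int)) (t : Int)
    (h : pvInv seen L) : pvInv seen (L ++ [[t]]) := by
  intro p
  rw [h p]
  simp [List.mem_append]

theorem pvInv_add (seen : PySem.Set (Int × Int)) (L : List (List Int)) (x y : Int)
    (h : pvInv seen L) :
    pvInv (PySem.Set.add seen (if x ≤ y then (x, y) else (y, x))) (L ++ [[x, y]]) := by
  rintro ⟨a, b⟩
  rw [PySem.Set.mem_add, h ⟨a, b⟩]
  simp only [List.mem_append, List.mem_singleton, List.cons.injEq, and_true]
  by_cases hxy : x ≤ y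
  · rw [if_pos hxy]
    constructor
    · rintro (⟨h1, h2 | h2⟩ | hk)
      · exact ⟨h1, Or.inl (Or.inl h2)⟩
      · exact ⟨h1, Or.inr (Or.inl h2)⟩
      · rw [Prod.mk.injEq] at hk
        exact ⟨by omega, Or.inl (Or.inr ⟨hk.1, hk.2⟩)⟩
    · rintro ⟨h1, (h2 | h2) | (h2 | h2)⟩
      · exact Or.inl ⟨h1, Or.inl h2⟩
      · exact Or.inr (by rw [Prod.mk.injEq]; omega)
      · exact Or.inl ⟨h1, Or.inr h2⟩
      · exact Or.inr (by rw [Prod.mk.injEq]; omega)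
  · rw [if_neg hxy]
    constructor
    · rintro (⟨h1, h2 | h2⟩ | hk)
      · exact ⟨h1, Or.inl (Or.inl h2)⟩
      · exact ⟨h1, Or.inr (Or.inl h2)⟩
      · rw [Prod.mk.injEq] at hk
        exact ⟨by omega, Or.inr (Or.inr ⟨hk.2, hk.1⟩)⟩
    · rintro ⟨h1, (h2 | h2) | (h2 | h2)⟩
      · exact Or.inl ⟨h1, Or.inl h2⟩
      · exact Or.inr (by rw [Prod.mk.injEq]; omega)
      · exact Or.inl ⟨h1, Or.inr h2⟩
      · exact Or.inr (by rw [Prod.mk.injEq]; omega)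

theorem pv_lift (t x : Int) (P : PySem.Set (Int × Int) × List (List Int)) (L1 : List (List Int))
    (h2 : P.2 = L1) (hi : pvInv P.1 P.2) :
    ((if x = t then (P.1, P.2 ++ [[t]]) else P).2 = if x = t then L1 ++ [[t]] else L1) ∧
      pvInv (if x = t then (P.1, P.2 ++ [[t]]) else P).1
        (if x = t then (P.1, P.2 ++ [[t]]) else P).2 := by
  by_cases hxt : x = t
  · simp only [if_pos hxt]
    exact ⟨by rw [h2], pvInv_singleton _ _ _ hi⟩
  · simp only [if_neg hxt]
    exact ⟨h2, hi⟩

theorem pv_stepB_eq (arr : List Int) (t x : Int) (seen : PySem.Set (Int × Int))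
    (L : List (List Int)) (hinv : pvInv seen L) :
    (pvStepB arr t (seen, L) x).2 = pvStepV arr t L x ∧
      pvInv (pvStepB arr t (seen, L) x).1 (pvStepB arr t (seen, L) x).2 := by
  have hcond : ((PySem.Dict.counter arr).contains (t - x) = true ∧
      ((t - x) ≠ x ∨ 2 ≤ (PySem.Dict.counter arr).getD x 0)) ↔ pvCval arr t x = true := by
    simp only [PySem.Dict.contains_counter, PySem.Dict.getD_counter, pvCval,
      List.contains_eq_mem, decide_eq_true_eq, Bool.and_eq_true, Bool.or_eq_true, ne_eq]
    constructor
    · rintro ⟨h1, h2 | h2⟩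
      · exact ⟨h1, Or.inl h2⟩
      · exact ⟨h1, Or.inr (by exact_mod_cast h2)⟩
    · rintro ⟨h1, h2 | h2⟩
      · exact ⟨h1, Or.inl h2⟩
      · exact ⟨h1, Or.inr (by exact_mod_cast h2)⟩
  have hkey : (PySem.Set.contains seen (if x ≤ (t - x) then (x, t - x) else (t - x, x)) = true)
      ↔ ([x, t - x] ∈ L ∨ [t - x, x] ∈ L) := by
    rw [PySem.Set.contains_iff]
    by_cases hxy : x ≤ t - x
    · rw [if_pos hxy, hinv (x, t - x)]
      constructor
      · rintro ⟨_, h⟩; exact h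
      · intro h; exact ⟨hxy, h⟩
    · rw [if_neg hxy, hinv (t - x, x)]
      constructor
      · rintro ⟨_, h | h⟩; exacts [Or.inr h, Or.inl h]
      · intro h; exact ⟨by omega, by rcases h with h | h; exacts [Or.inr h, Or.inl h]⟩
  simp only [pvStepB, pvStepV]
  refine pv_lift t x _ _ ?_ ?_
  · by_cases hcv : pvCval arr t x = true
    · by_cases hk : [x, t - x] ∈ L ∨ [t - x, x] ∈ L
      · rw [if_pos (hcond.mpr hcv), if_neg (not_not_intro (hkey.mpr hk))]
        exact (if_neg (fun hcon => hk.elim hcon.2.1 hcon.2.2)).symm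
      · rw [not_or] at hk
        rw [if_pos (hcond.mpr hcv),
            if_pos (fun hcon => hk.1 ((hkey.mp hcon).resolve_right hk.2))]
        exact (if_pos ⟨hcv, hk.1, hk.2⟩).symm
    · rw [if_neg (fun h => hcv (hcond.mp h))]
      exact (if_neg (fun hcon => hcv hcon.1)).symm
  · by_cases hcv : pvCval arr t x = true
    · by_cases hk : [x, t - x] ∈ L ∨ [t - x, x] ∈ L
      · rw [if_pos (hcond.mpr hcv), if_neg (not_not_intro (hkey.mpr hk))]
        exact hinv
      · rw [not_or] at hk
        rw [if_pos (hcond.mpr hcv),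
            if_pos (fun hcon => hk.1 ((hkey.mp hcon).resolve_right hk.2))]
        exact pvInv_add seen L x (t - x) hinv
    · rw [if_neg (fun h => hcv (hcond.mp h))]
      exact hinv

theorem pv_fold_eq (arr : List Int) (t : Int) (xs : List Int) :
    ∀ (seen : PySem.Set (Int × Int)) (L : List (List Int)), pvInv seen L →
      (xs.foldl (pvStepB arr t) (seen, L)).2 = xs.foldl (pvStepV arr t) L ∧
        pvInv (xs.foldl (pvStepB arr t) (seen, L)).1 (xs.foldl (pvStepB arr t) (seen, L)).2 := by
  induction xs with
  | nil => intro seen L h; exact ⟨rfl, h⟩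
  | cons x xs ih =>
    intro seen L h
    obtain ⟨h1, h2⟩ := pv_stepB_eq arr t x seen L h
    simp only [List.foldl_cons]
    have hmain := ih (pvStepB arr t (seen, L) x).1 (pvStepB arr t (seen, L) x).2 h2
    rw [Prod.mk.eta] at hmain
    rw [h1] at hmain
    exact hmain

theorem pv_B_eq_foldV (arr : List Int) (t : Int) :
    group_by_sum_alt arr t = arr.foldl (pvStepV arr t) [] := by
  unfold group_by_sum_alt
  simp only [PySem.Dict.foldl_insert_getD_add_one_eq_counter]
  have hempty : pvInv PySem.Set.empty [] := by
    intro p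
    simp [PySem.Set.empty]
  exact (pv_fold_eq arr t arr PySem.Set.empty [] hempty).1

-- ===== VERDICT (by name: the statement is the Claim_ definition above) =====
theorem group_by_sum_spec : Claim_equal_group_by_sum := by
  intro arr t _
  unfold Spec_group_by_sum
  rw [pv_A_eq_foldV, pv_B_eq_foldV]
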